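-- pv_equiv track=rewrite | github.com/varadrz/60-Days-of-Coding-DSA-Real-World-Projects | Day-20-Server Load Balancer Simulator/Day-20.py | find_minimum_max_load
-- ===== SOURCE A (Python) =====
-- def can_distribute(loads, servers, max_load):
--     """
--     Check if tasks can be distributed across servers
--     such that no server exceeds max_load.
--     """
--     required_servers = 1
--     current_load = 0
--
--     for load in loads:
--         if load > max_load:
--             return False
--
--         if current_load + load <= max_load:
--             current_load += load
--         else:
--             required_servers += 1
--             current_load = load
--
--             if required_servers > servers:
--                 return False
--
--     return True
--
-- def find_minimum_max_load(loads, servers):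
--     low = max(loads)
--     high = sum(loads)
--     answer = high
--
--     while low <= high:
--         mid = (low + high) // 2
--
--         if can_distribute(loads, servers, mid):
--             answer = mid
--             high = mid - 1
--         else:
--             low = mid + 1
--
--     return answer
-- ===== SOURCE B (Python) =====
-- def find_minimum_max_load(loads, servers):
--     n = len(loads)
--     prefix = [0]
--     acc = 0
--     for x in loads:
--         acc += x
--         prefix.append(acc)
--     dp = list(prefix)  # one part: dp[i] = sum of first i loads
--     for _ in range(min(servers, n) - 1):
--         dp = [min(max(dp[j], prefix[i] - prefix[j]) for j in range(i + 1))
--               for i in range(n + 1)]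
--     return dp[n]
-- ===== Notes on version B (the rewrite author's own statement) =====
-- stated objective: alternative
-- what changed: Replaces the binary-search-on-answer with the greedy feasibility check by a bottom-up dynamic program over prefix sums (dp[k][i] = minimal possible maximum segment sum splitting the first i tasks into k contiguous parts).
-- outside the precondition, e.g. on find_minimum_max_load([3, -2, 3, -2], 2): A returns 2, B returns 1
import Mathlib
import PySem

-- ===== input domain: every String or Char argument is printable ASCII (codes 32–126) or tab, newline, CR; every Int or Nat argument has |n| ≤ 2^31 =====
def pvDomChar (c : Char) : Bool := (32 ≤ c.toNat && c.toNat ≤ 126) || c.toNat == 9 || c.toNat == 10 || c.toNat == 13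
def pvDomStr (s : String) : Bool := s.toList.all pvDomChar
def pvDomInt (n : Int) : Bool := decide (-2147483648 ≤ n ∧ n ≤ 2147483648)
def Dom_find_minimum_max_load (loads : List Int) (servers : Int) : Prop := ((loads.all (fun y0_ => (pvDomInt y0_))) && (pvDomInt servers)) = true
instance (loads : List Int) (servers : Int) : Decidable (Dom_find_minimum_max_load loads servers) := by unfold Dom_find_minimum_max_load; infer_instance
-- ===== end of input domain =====

-- B replaces A's binary search on the answer (with a greedy feasibility check) by a bottom-up
-- dynamic program over prefix sums; same return value on the stated domain, similar cost (not faster).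

-- ===== PORT A =====

-- the 'for load in loads' loop of can_distribute, state (required_servers, current_load)
def canDistLoop (servers max_load : Int) : List Int → Int → Int → Bool
  | [], _, _ => true
  | l :: rest, req, cur =>
    if l > max_load then false
    else if cur + l ≤ max_load then canDistLoop servers max_load rest req (cur + l)
    else if req + 1 > servers then false
    else canDistLoop servers max_load rest (req + 1) l

def can_distribute (loads : List Int) (servers : Int) (max_load : Int) : Bool :=
  canDistLoop servers max_load loads 1 0

-- the 'while low <= high' loop of find_minimum_max_load
def searchLoop (loads : List Int) (servers : Int) (low high answer : Int) : Int :=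
  if h : low ≤ high then
    let mid := PySem.Int.floordiv (low + high) 2
    if can_distribute loads servers mid then searchLoop loads servers low (mid - 1) mid
    else searchLoop loads servers (mid + 1) high answer
  else answer
termination_by (high + 1 - low).toNat
decreasing_by
  all_goals
    have hb := PySem.Int.floordiv_two_mid_bounds h
    omega

-- max(loads) raises ValueError on []; that input is outside Pre_ (the .getD 0 is never used there)
def find_minimum_max_load (loads : List Int) (servers : Int) : Int :=
  let low := (PySem.List.max? loads (fun y => y)).getD 0
  let high := loads.sum
  searchLoop loads servers low high high

-- ===== PORT B =====

-- min(...) over a nonempty generated list (Source B never takes min of an empty one)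
def pyMinI (xs : List Int) : Int := (PySem.List.min? xs (fun y => y)).getD 0

-- one round of the dp list comprehension, for a fixed prefix table
def dpStep (pre : List Int) (n : Nat) (dp : List Int) : List Int :=
  (List.range (n + 1)).map (fun i =>
    pyMinI ((List.range (i + 1)).map (fun j => max (dp.getD j 0) (pre.getD i 0 - pre.getD j 0))))

def find_minimum_max_load_alt (loads : List Int) (servers : Int) : Int :=
  let n := loads.length
  let st := loads.foldl (fun (p : List Int × Int) x => (p.1 ++ [p.2 + x], p.2 + x)) ([0], 0)
  let pre := st.1
  let dp := (List.range ((min servers (n : Int) - 1).toNat)).foldl (fun dp _ => dpStep pre n dp) pre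
  dp.getD n 0

-- ===== PRECONDITION & SPEC =====

-- Pre_ excludes the empty list, on which A raises ValueError (max of an empty sequence), and lists
-- containing a negative load when there are at least two loads and at least two servers: negative
-- loads are outside the natural domain of server task loads (A's binary-search bracket
-- [max(loads), sum(loads)] is meaningless there); with one load or at most one server both
-- programs return sum(loads) even for negative loads, so those inputs stay inside Pre_.
def Pre_find_minimum_max_load (loads : List Int) (servers : Int) : Prop :=
  loads ≠ [] ∧ ((∀ l ∈ loads, 0 ≤ l) ∨ servers ≤ 1 ∨ loads.length = 1)

instance (loads : List Int) (servers : Int) : Decidable (Pre_find_minimum_max_load loads servers) := by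
  unfold Pre_find_minimum_max_load; infer_instance

def pvWitness_find_minimum_max_load : List Int × Int := ([3, 1, 2], 2)

def Spec_find_minimum_max_load (loads : List Int) (servers : Int) (out : Int) : Prop :=
  out = find_minimum_max_load_alt loads servers

instance (loads : List Int) (servers : Int) (out : Int) : Decidable (Spec_find_minimum_max_load loads servers out) := by
  unfold Spec_find_minimum_max_load; infer_instance

-- ===== CLAIM (what is proved, stated in full; the proofs are below) =====
def Claim_equal_find_minimum_max_load : Prop := ∀ (loads : List Int) (servers : Int), Dom_find_minimum_max_load loads servers → Pre_find_minimum_max_load loads servers → Spec_find_minimum_max_load loads servers (find_minimum_max_load loads servers)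

-- ===== LEMMAS AND PROOFS =====

-- greedy chunk count (number of servers the greedy packing uses, counting the open chunk), servers ignored
def gc (m : Int) (c : Int) : List Int → Int
  | [] => 1
  | l :: ls => if c + l ≤ m then gc m (c + l) ls else 1 + gc m l ls

lemma gc_pos (m c : Int) (xs : List Int) : 1 ≤ gc m c xs := by
  induction xs generalizing c with
  | nil => simp [gc]
  | cons l ls ih => by_cases h : c + l ≤ m <;> simp [gc, h] <;> have := ih (c + l) <;> have := ih l <;> omega

-- canDistLoop is: every load fits alone, and the greedy chunk count keeps within the server budget
lemma canDistLoop_iff (servers m : Int) (xs : List Int) : ∀ c req, 1 ≤ req → req ≤ max servers 1 →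
    (canDistLoop servers m xs req c = true ↔ (∀ l ∈ xs, l ≤ m) ∧ req - 1 + gc m c xs ≤ max servers 1) := by
  induction xs with
  | nil =>
    intro c req h1 h2
    simp only [canDistLoop, gc]
    constructor
    · intro _; exact ⟨by simp, by omega⟩
    · intro _; trivial
  | cons l ls ih =>
    intro c req h1 h2
    by_cases hl : l > m
    · have he : canDistLoop servers m (l :: ls) req c = false := by simp [canDistLoop, hl]
      rw [he]
      simp only [Bool.false_eq_true, false_iff, not_and]
      intro hall
      exact absurd (hall l (by simp)) (by omega)
    · have hlm : l ≤ m := by omega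
      by_cases hfit : c + l ≤ m
      · have he : canDistLoop servers m (l :: ls) req c = canDistLoop servers m ls req (c + l) := by
          simp [canDistLoop, hl, hfit]
        rw [he, ih (c + l) req h1 h2]
        simp only [gc, if_pos hfit, List.mem_cons]
        constructor
        · rintro ⟨ha, hb⟩
          exact ⟨fun x hx => hx.elim (fun hh => hh ▸ hlm) (ha x), hb⟩
        · rintro ⟨ha, hb⟩
          exact ⟨fun x hx => ha x (Or.inr hx), hb⟩
      · by_cases hov : req + 1 > servers
        · have he : canDistLoop servers m (l :: ls) req c = false := by
            simp [canDistLoop, hl, hfit, hov]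
          rw [he]
          simp only [gc, if_neg hfit, Bool.false_eq_true, false_iff, not_and]
          intro _
          have := gc_pos m l ls
          omega
        · have he : canDistLoop servers m (l :: ls) req c = canDistLoop servers m ls (req + 1) l := by
            simp [canDistLoop, hl, hfit, hov]
          rw [he, ih l (req + 1) (by omega) (by omega)]
          simp only [gc, if_neg hfit, List.mem_cons]
          constructor
          · rintro ⟨ha, hb⟩
            exact ⟨fun x hx => hx.elim (fun hh => hh ▸ hlm) (ha x), by omega⟩
          · rintro ⟨ha, hb⟩
            exact ⟨fun x hx => ha x (Or.inr hx), by omega⟩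

-- monotonicity of gc in the open-chunk load (and the one-extra-chunk bound), nonnegative loads
lemma gc_mono_pair (m : Int) (xs : List Int) (hxs : ∀ l ∈ xs, 0 ≤ l) : ∀ c c', 0 ≤ c → 0 ≤ c' →
    ((c ≤ c' → gc m c xs ≤ gc m c' xs) ∧ gc m c xs ≤ 1 + gc m c' xs) := by
  induction xs with
  | nil => intro c c' _ _; simp [gc]
  | cons l ls ih =>
    intro c c' hc hc'
    have hl : 0 ≤ l := hxs l (by simp)
    have hls : ∀ x ∈ ls, 0 ≤ x := fun x hx => hxs x (by simp [hx])
    have ih' := fun c c' hc hc' => ih hls c c' hc hc'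
    constructor
    · intro hcc
      by_cases h1 : c + l ≤ m
      · by_cases h2 : c' + l ≤ m
        · simp only [gc, if_pos h1, if_pos h2]
          exact (ih' (c + l) (c' + l) (by omega) (by omega)).1 (by omega)
        · simp only [gc, if_pos h1, if_neg h2]
          have := (ih' (c + l) l (by omega) (by omega)).2
          omega
      · have h2 : ¬ c' + l ≤ m := by omega
        simp only [gc, if_neg h1, if_neg h2]
        omega
    · by_cases h1 : c + l ≤ m
      · by_cases h2 : c' + l ≤ m
        · simp only [gc, if_pos h1, if_pos h2]
          exact (ih' (c + l) (c' + l) (by omega) (by omega)).2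
        · simp only [gc, if_pos h1, if_neg h2]
          have := (ih' (c + l) l (by omega) (by omega)).2
          omega
      · by_cases h2 : c' + l ≤ m
        · simp only [gc, if_neg h1, if_pos h2]
          have := (ih' l (c' + l) (by omega) (by omega)).1 (by omega)
          omega
        · simp only [gc, if_neg h1, if_neg h2]
          have := (ih' l l (by omega) (by omega)).1 (le_refl l)
          omega

-- gc is subadditive over concatenation
lemma gc_append (m : Int) (xs ys : List Int) (hxs : ∀ l ∈ xs, 0 ≤ l) (hys : ∀ l ∈ ys, 0 ≤ l) : ∀ c, 0 ≤ c →
    gc m c (xs ++ ys) ≤ gc m c xs + gc m 0 ys := by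
  induction xs with
  | nil =>
    intro c hc
    have := (gc_mono_pair m ys hys c 0 hc (by norm_num)).2
    simp only [List.nil_append, gc]
    omega
  | cons l ls ih =>
    intro c hc
    have hl : 0 ≤ l := hxs l (by simp)
    have hls : ∀ x ∈ ls, 0 ≤ x := fun x hx => hxs x (by simp [hx])
    by_cases h : c + l ≤ m
    · simp only [List.cons_append, gc, if_pos h]
      exact ih hls (c + l) (by omega)
    · simp only [List.cons_append, gc, if_neg h]
      have := ih hls l hl
      omega

-- a block whose total fits needs one chunk
lemma gc_no_split (m : Int) (xs : List Int) (hxs : ∀ l ∈ xs, 0 ≤ l) : ∀ c, c + xs.sum ≤ m → gc m c xs = 1 := by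
    induction xs with
  | nil => intro c _; simp [gc]
  | cons l ls ih =>
    intro c hsum
    have hls : ∀ x ∈ ls, 0 ≤ x := fun x hx => hxs x (by simp [hx])
    have hsn : 0 ≤ ls.sum := List.sum_nonneg hls
    have hfit : c + l ≤ m := by simp [List.sum_cons] at hsum; omega
    simp [gc, hfit]
    exact ih hls (c + l) (by simp [List.sum_cons] at hsum; omega)

lemma gc_one_sum (m : Int) (xs : List Int) (hne : xs ≠ []) : ∀ c, gc m c xs = 1 → c + xs.sum ≤ m := by
  induction xs with
  | nil => exact absurd rfl hne
  | cons l ls ih =>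
    intro c h1
    by_cases hfit : c + l ≤ m
    · rw [show gc m c (l :: ls) = gc m (c + l) ls from by simp [gc, hfit]] at h1
      by_cases hn : ls = []
      · subst hn; simp only [List.sum_cons, List.sum_nil, add_zero]; omega
      · have := ih hn (c + l) h1
        simp only [List.sum_cons]; omega
    · rw [show gc m c (l :: ls) = 1 + gc m l ls from by simp [gc, hfit]] at h1
      have := gc_pos m l ls
      omega

lemma gc_le_len (m : Int) (xs : List Int) (hne : xs ≠ []) (hle : ∀ l ∈ xs, l ≤ m) :
    gc m 0 xs ≤ (xs.length : Int) := by
  have step : ∀ (t : List Int) (c : Int), gc m c t ≤ 1 + (t.length : Int) := by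
    intro t
    induction t with
    | nil => intro c; simp [gc]
    | cons x ts ih =>
      intro c
      by_cases h : c + x ≤ m
      · simp only [gc, if_pos h, List.length_cons]
        have := ih (c + x)
        push_cast
        omega
      · simp only [gc, if_neg h, List.length_cons]
        have := ih x
        push_cast
        omega
  match xs, hne with
  | l :: ls, _ =>
    have h0 : (0 : Int) + l ≤ m := by have := hle l (by simp); omega
    simp only [gc, if_pos h0, List.length_cons]
    have := step ls (0 + l)
    push_cast
    omega

-- length of greedy's first chunk
def fc (m : Int) (c : Int) : List Int → Nat
  | [] => 0
  | l :: ls => if c + l ≤ m then 1 + fc m (c + l) ls else 0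

lemma fc_sum_le (m : Int) (xs : List Int) : ∀ c, c ≤ m → c + ((xs.take (fc m c xs)).sum) ≤ m := by
  induction xs with
  | nil => intro c hc; simp [fc]; omega
  | cons l ls ih =>
    intro c hc
    by_cases h : c + l ≤ m
    · simp only [fc, if_pos h]
      rw [show 1 + fc m (c + l) ls = fc m (c + l) ls + 1 from Nat.add_comm _ _]
      rw [List.take_succ_cons, List.sum_cons]
      have := ih (c + l) h
      omega
    · simp only [fc, if_neg h]
      simp
      omega

lemma gc_fc_split (m : Int) (xs : List Int) (hle : ∀ l ∈ xs, l ≤ m) : ∀ c, 2 ≤ gc m c xs →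
    gc m c xs = 1 + gc m 0 (xs.drop (fc m c xs)) ∧ fc m c xs < xs.length := by
  induction xs with
  | nil => intro c h2; simp [gc] at h2
  | cons l ls ih =>
    intro c h2
    have hl : l ≤ m := hle l (by simp)
    have hls : ∀ x ∈ ls, x ≤ m := fun x hx => hle x (by simp [hx])
    by_cases h : c + l ≤ m
    · simp only [gc, if_pos h] at h2 ⊢
      obtain ⟨e, lt⟩ := ih hls (c + l) h2
      simp only [fc, if_pos h]
      rw [show 1 + fc m (c + l) ls = fc m (c + l) ls + 1 from Nat.add_comm _ _]
      rw [List.drop_succ_cons]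
      refine ⟨e, ?_⟩
      simp only [List.length_cons]
      omega
    · simp only [gc, if_neg h]
      simp only [fc, if_neg h]
      refine ⟨?_, by simp⟩
      rw [List.drop_zero]
      have hg : gc m 0 (l :: ls) = gc m l ls := by
        simp only [gc]
        rw [if_pos (by omega : (0:Int) + l ≤ m), zero_add]
      rw [hg]

-- B's recursive specification: minimal possible maximum contiguous-segment sum with at most k parts
def bestR (k : Int) (xs : List Int) : Int :=
  if k ≤ 1 then xs.sum
  else pyMinI ((List.range (xs.length + 1)).map
        (fun j => max (bestR (k - 1) (xs.take j)) ((xs.drop j).sum)))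
termination_by (k - 1).toNat
decreasing_by omega

lemma pyMinI_le (xs : List Int) (x : Int) (hx : x ∈ xs) : pyMinI xs ≤ x := by
  match xs with
  | y :: t =>
    rw [pyMinI, PySem.List.min?_id_cons, Option.getD_some]
    rcases List.mem_cons.mp hx with h | h
    · subst h; exact (PySem.List.foldl_min_le t x).1
    · exact (PySem.List.foldl_min_le t y).2 x h

lemma pyMinI_mem (xs : List Int) (hne : xs ≠ []) : pyMinI xs ∈ xs := by
  match xs, hne with
  | y :: t, _ =>
    rw [pyMinI, PySem.List.min?_id_cons, Option.getD_some]
    rcases PySem.List.foldl_min_mem t y with h | h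
    · rw [h]; exact List.mem_cons_self
    · exact List.mem_cons_of_mem y h

lemma bestR_le (k : Int) (xs : List Int) (j : Nat) (hk : ¬ k ≤ 1) (hj : j ≤ xs.length) :
    bestR k xs ≤ max (bestR (k - 1) (xs.take j)) ((xs.drop j).sum) := by
  rw [bestR, if_neg hk]
  exact pyMinI_le _ _ (List.mem_map_of_mem (List.mem_range.mpr (by omega)))

lemma bestR_attain (k : Int) (xs : List Int) (hk : ¬ k ≤ 1) :
    ∃ j ≤ xs.length, bestR k xs = max (bestR (k - 1) (xs.take j)) ((xs.drop j).sum) := by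
  rw [bestR, if_neg hk]
  have hne : ((List.range (xs.length + 1)).map
      (fun j => max (bestR (k - 1) (xs.take j)) ((xs.drop j).sum))) ≠ [] := by simp
  obtain ⟨j, hj, he⟩ := List.mem_map.mp (pyMinI_mem _ hne)
  exact ⟨j, by have := List.mem_range.mp hj; omega, he.symm⟩

lemma bestR_nil (k : Int) : bestR k [] = 0 := by
  by_cases hk : k ≤ 1
  · rw [bestR]; simp [hk]
  · have ihk := bestR_nil (k - 1)
    rw [bestR]
    simp [hk, pyMinI, ihk, PySem.List.min?_id_cons]
termination_by (k - 1).toNat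
decreasing_by omega

lemma bestR_le_sum (k : Int) (xs : List Int) (hxs : ∀ l ∈ xs, 0 ≤ l) : bestR k xs ≤ xs.sum := by
  by_cases hk : k ≤ 1
  · rw [bestR]; simp [hk]
  · have h := bestR_le k xs 0 hk (by omega)
    simp only [List.take_zero, List.drop_zero, bestR_nil] at h
    have := List.sum_nonneg hxs
    omega

-- bestR also admits splitting off a FIRST chunk
lemma bestR_first_chunk (k : Int) (pre rest : List Int) (hk : 2 ≤ k)
    (hpre : ∀ l ∈ pre, 0 ≤ l) (hrest : ∀ l ∈ rest, 0 ≤ l) :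
    bestR k (pre ++ rest) ≤ max pre.sum (bestR (k - 1) rest) := by
  have hkn : ¬ k ≤ 1 := by omega
  by_cases hk1 : k - 1 ≤ 1
  · have h1 : bestR (k - 1) rest = rest.sum := by rw [bestR]; simp [hk1]
    have hb := bestR_le k (pre ++ rest) pre.length hkn (by simp)
    rw [List.take_left, List.drop_left] at hb
    have h2 := bestR_le_sum (k - 1) pre hpre
    omega
  · obtain ⟨j, hj, he⟩ := bestR_attain (k - 1) rest hk1
    have IH := bestR_first_chunk (k - 1) pre (rest.take j) (by omega) hpre
      (fun l hl => hrest l (List.mem_of_mem_take hl))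
    have hb := bestR_le k (pre ++ rest) (pre.length + j) hkn (by simp; omega)
    rw [List.take_append, List.drop_append] at hb
    rw [List.take_of_length_le (by omega), List.drop_eq_nil_of_le (by omega),
      Nat.add_sub_cancel_left, List.nil_append] at hb
    omega
termination_by (k - 1).toNat
decreasing_by omega

lemma feas_to_bestR (m k : Int) (hm : 0 ≤ m) (xs : List Int) (hpos : ∀ l ∈ xs, 0 ≤ l)
    (hle : ∀ l ∈ xs, l ≤ m) (hgc : gc m 0 xs ≤ max k 1) : bestR k xs ≤ m := by
  by_cases h2 : 2 ≤ gc m 0 xs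
  · have hk2 : 2 ≤ k := by omega
    obtain ⟨e, flt⟩ := gc_fc_split m xs hle 0 h2
    have hfpos : 0 < fc m 0 xs := by
      rcases Nat.eq_zero_or_pos (fc m 0 xs) with h0 | h
      · exfalso; rw [h0, List.drop_zero] at e; omega
      · exact h
    have ihdrop := feas_to_bestR m (k - 1) hm (xs.drop (fc m 0 xs))
      (fun l hl => hpos l (List.mem_of_mem_drop hl))
      (fun l hl => hle l (List.mem_of_mem_drop hl))
      (by omega)
    have hchunk : (xs.take (fc m 0 xs)).sum ≤ m := by have := fc_sum_le m xs 0 hm; omega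
    have hfin := bestR_first_chunk k (xs.take (fc m 0 xs)) (xs.drop (fc m 0 xs)) hk2
      (fun l hl => hpos l (List.mem_of_mem_take hl))
      (fun l hl => hpos l (List.mem_of_mem_drop hl))
    rw [List.take_append_drop] at hfin
    omega
  · have hg1 : gc m 0 xs = 1 := by have := gc_pos m 0 xs; omega
    by_cases hn : xs = []
    · subst hn; rw [bestR_nil]; omega
    · have hsum : xs.sum ≤ m := by have := gc_one_sum m xs hn 0 hg1; omega
      have := bestR_le_sum k xs hpos
      omega
termination_by xs.length
decreasing_by simp only [List.length_drop]; omega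

lemma bestR_to_feas (m : Int) (k : Int) (xs : List Int) (hpos : ∀ l ∈ xs, 0 ≤ l)
    (hb : bestR k xs ≤ m) : ((∀ l ∈ xs, l ≤ m) ∧ gc m 0 xs ≤ max k 1) := by
  by_cases hk : k ≤ 1
  · have hsum : xs.sum ≤ m := by rw [bestR] at hb; simpa [hk] using hb
    have hall : ∀ l ∈ xs, l ≤ m := fun l hl => le_trans (List.single_le_sum hpos l hl) hsum
    refine ⟨hall, ?_⟩
    by_cases hn : xs = []
    · subst hn; simp [gc]
    · rw [gc_no_split m xs hpos 0 (by omega)]; omega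
  · obtain ⟨j, hj, he⟩ := bestR_attain k xs hk
    rw [he] at hb
    have h1 : bestR (k - 1) (xs.take j) ≤ m := by omega
    have h2 : (xs.drop j).sum ≤ m := by omega
    have IH := bestR_to_feas m (k - 1) (xs.take j) (fun l hl => hpos l (List.mem_of_mem_take hl)) h1
    have hdpos : ∀ l ∈ xs.drop j, 0 ≤ l := fun l hl => hpos l (List.mem_of_mem_drop hl)
    have hall : ∀ l ∈ xs, l ≤ m := by
      intro l hl
      rw [← List.take_append_drop j xs] at hl
      rcases List.mem_append.mp hl with h | h
      · exact IH.1 l h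
      · exact le_trans (List.single_le_sum hdpos l h) h2
    refine ⟨hall, ?_⟩
    by_cases hdn : xs.drop j = []
    · have htk : xs.take j = xs := List.take_of_length_le (by
        have := List.drop_eq_nil_iff.mp hdn; omega)
      rw [htk] at IH
      have := IH.2
      omega
    · have hg1 : gc m 0 (xs.drop j) = 1 := gc_no_split m _ hdpos 0 (by omega)
      have happ := gc_append m (xs.take j) (xs.drop j)
        (fun l hl => hpos l (List.mem_of_mem_take hl)) hdpos 0 (by omega)
      rw [List.take_append_drop] at happ
      have := IH.2
      omega
termination_by (k - 1).toNat
decreasing_by omega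

-- the key equivalence: A's feasibility test at m holds exactly when B's answer is ≤ m
lemma canDist_iff_bestR (loads : List Int) (servers : Int) (hne : loads ≠ [])
    (hpos : ∀ l ∈ loads, 0 ≤ l) (m : Int) :
    (can_distribute loads servers m = true ↔ bestR (max (min servers (loads.length : Int)) 1) loads ≤ m) := by
  have hlen : 0 < loads.length := List.length_pos_iff.mpr hne
  have hiff := canDistLoop_iff servers m loads 0 1 (by omega) (by omega)
  rw [show can_distribute loads servers m = canDistLoop servers m loads 1 0 from rfl, hiff]
  constructor
  · rintro ⟨hall, hgc⟩
    have hg1 := gc_pos m 0 loads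
    have hglen := gc_le_len m loads hne hall
    obtain ⟨l0, hl0⟩ := List.exists_mem_of_ne_nil loads hne
    have hm : 0 ≤ m := le_trans (hpos l0 hl0) (hall l0 hl0)
    exact feas_to_bestR m _ hm loads hpos hall (by omega)
  · intro hb
    obtain ⟨hall, hgc⟩ := bestR_to_feas m _ loads hpos hb
    exact ⟨hall, by omega⟩

-- the prefix-sum table as a closed form
def Ptab (loads : List Int) : List Int :=
  (List.range (loads.length + 1)).map (fun i => (loads.take i).sum)

lemma prefix_fold (xs : List Int) : ∀ (p : List Int) (a : Int),
    xs.foldl (fun (q : List Int × Int) x => (q.1 ++ [q.2 + x], q.2 + x)) (p, a)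
      = (p ++ (List.range xs.length).map (fun i => a + (xs.take (i + 1)).sum), a + xs.sum) := by
  induction xs with
  | nil => intro p a; simp
  | cons x t ih =>
    intro p a
    rw [List.foldl_cons, ih (p ++ [a + x]) (a + x)]
    rw [List.length_cons, List.range_succ_eq_map, List.map_cons, List.map_map]
    simp [Function.comp, List.take_succ_cons, List.sum_cons, add_assoc]

lemma prefix_eq (loads : List Int) :
    (loads.foldl (fun (q : List Int × Int) x => (q.1 ++ [q.2 + x], q.2 + x)) ([0], 0)).1 = Ptab loads := by
  rw [prefix_fold]
  unfold Ptab
  rw [List.range_succ_eq_map, List.map_cons, List.map_map]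
  simp [Function.comp]

lemma Ptab_getD (loads : List Int) (i : Nat) (hi : i ≤ loads.length) :
    (Ptab loads).getD i 0 = (loads.take i).sum := by
  unfold Ptab
  rw [List.getD_eq_getElem?_getD, List.getElem?_map, List.getElem?_range (by omega)]
  rfl

lemma dpStep_map (loads : List Int) (q : Int) (hq : 1 ≤ q) :
    dpStep (Ptab loads) loads.length
        ((List.range (loads.length + 1)).map (fun i => bestR q (loads.take i)))
      = (List.range (loads.length + 1)).map (fun i => bestR (q + 1) (loads.take i)) := by
  unfold dpStep
  apply List.map_congr_left
  intro i hi
  have hi' : i ≤ loads.length := by have := List.mem_range.mp hi; omega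
  rw [bestR, if_neg (by omega : ¬ q + 1 ≤ 1)]
  congr 1
  rw [show (loads.take i).length = i from by simp [List.length_take]; omega]
  apply List.map_congr_left
  intro j hj
  have hj' : j ≤ i := by have := List.mem_range.mp hj; omega
  have hdp : ((List.range (loads.length + 1)).map (fun i => bestR q (loads.take i))).getD j 0
      = bestR q (loads.take j) := by
    rw [List.getD_eq_getElem?_getD, List.getElem?_map, List.getElem?_range (by omega)]
    rfl
  have htt : (loads.take i).take j = loads.take j := by
    rw [List.take_take]; congr 1; omega
  have hsplit : (loads.take j).sum + ((loads.take i).drop j).sum = (loads.take i).sum := by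
    conv_rhs => rw [← List.take_append_drop j (loads.take i)]
    rw [List.sum_append, htt]
  rw [hdp, Ptab_getD loads i hi', Ptab_getD loads j (by omega), htt]
  rw [show q + 1 - 1 = q from by ring]
  omega

lemma dp_fold (loads : List Int) : ∀ t : Nat,
    (List.range t).foldl (fun dp _ => dpStep (Ptab loads) loads.length dp) (Ptab loads)
      = (List.range (loads.length + 1)).map (fun i => bestR (1 + (t : Int)) (loads.take i)) := by
  intro t
  induction t with
  | zero =>
    simp only [List.range_zero, List.foldl_nil]
    unfold Ptab
    apply List.map_congr_left
    intro i _
    rw [bestR]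
    norm_num
  | succ t ih =>
    rw [List.range_succ, List.foldl_append, ih, List.foldl_cons, List.foldl_nil]
    rw [dpStep_map loads (1 + (t : Int)) (by omega)]
    rw [show (1 : Int) + ((t + 1 : Nat) : Int) = (1 + (t : Int)) + 1 from by push_cast; ring]

lemma alt_eq_bestR (loads : List Int) (servers : Int) :
    find_minimum_max_load_alt loads servers
      = bestR (max (min servers (loads.length : Int)) 1) loads := by
  unfold find_minimum_max_load_alt
  simp only
  rw [prefix_eq, dp_fold loads ((min servers ((loads.length : Int)) - 1).toNat)]
  rw [List.getD_eq_getElem?_getD, List.getElem?_map, List.getElem?_range (by omega)]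
  simp only [Option.map_some, Option.getD_some, List.take_length]
  congr 1
  omega

-- degenerate budget: B returns the plain sum
lemma alt_eq_sum (loads : List Int) (servers : Int) (hk : min servers (loads.length : Int) ≤ 1) :
    find_minimum_max_load_alt loads servers = loads.sum := by
  unfold find_minimum_max_load_alt
  simp only
  rw [show (min servers ((loads.length : Int)) - 1).toNat = 0 from by omega]
  rw [List.range_zero, List.foldl_nil, prefix_eq, Ptab_getD loads loads.length le_rfl,
    List.take_length]

-- degenerate budget: any feasible cap is at least the sum
lemma canDist_sum_le (loads : List Int) (servers : Int) (hne : loads ≠ [])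
    (hs : servers ≤ 1 ∨ loads.length = 1) (m : Int)
    (hc : can_distribute loads servers m = true) : loads.sum ≤ m := by
  have h := (canDistLoop_iff servers m loads 0 1 (by omega) (by omega)).mp hc
  rcases hs with hs | hs
  · have h1 : gc m 0 loads = 1 := by have := gc_pos m 0 loads; omega
    have := gc_one_sum m loads hne 0 h1
    omega
  · obtain ⟨x, hx⟩ := List.length_eq_one_iff.mp hs
    subst hx
    have := h.1 x (by simp)
    simp only [List.sum_cons, List.sum_nil, add_zero]
    omega

-- the binary search leaves its initial answer when no cap below the sum is feasible
lemma searchLoop_sum (loads : List Int) (servers : Int)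
    (hCD : ∀ m, can_distribute loads servers m = true → loads.sum ≤ m) :
    ∀ low high ans, ans = loads.sum → high ≤ loads.sum →
      searchLoop loads servers low high ans = loads.sum := by
  intro low high ans
  fun_induction searchLoop loads servers low high ans with
  | case1 low high ans hle mid hcan ih =>
    intro h1 h2
    have hb := PySem.Int.floordiv_two_mid_bounds hle
    have hm := hCD mid hcan
    exact ih (by omega) (by omega)
  | case2 low high ans hle mid hcan ih =>
    intro h1 h2
    exact ih h1 h2
  | case3 low high ans hle =>
    intro h1 _
    exact h1

lemma searchLoop_eq (loads : List Int) (servers B : Int)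
    (hE : ∀ m, can_distribute loads servers m = true ↔ B ≤ m) :
    ∀ low high ans, low ≤ B → B ≤ ans → ans ≤ high + 1 → searchLoop loads servers low high ans = B := by
  intro low high ans
  fun_induction searchLoop loads servers low high ans with
  | case1 low high ans hle mid hcan ih =>
    intro h1 h2 h3
    have hb := PySem.Int.floordiv_two_mid_bounds hle
    have hm : B ≤ mid := (hE mid).mp hcan
    exact ih h1 hm (by omega)
  | case2 low high ans hle mid hcan ih =>
    intro h1 h2 h3
    have hb := PySem.Int.floordiv_two_mid_bounds hle
    have hm : ¬ B ≤ mid := fun h => by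
      rw [← hE mid] at h; exact absurd h (by simpa using hcan)
    exact ih (by omega) h2 h3
  | case3 low high ans hle =>
    intro h1 h2 h3
    omega

-- ===== VERDICT (by name: the statement is the Claim_ definition above) =====
theorem find_minimum_max_load_spec : Claim_equal_find_minimum_max_load := by
  unfold Claim_equal_find_minimum_max_load
  intro loads servers _ hpre
  obtain ⟨hne, hcase⟩ := hpre
  unfold Spec_find_minimum_max_load
  obtain ⟨v, hv⟩ : ∃ v, PySem.List.max? loads (fun y => y) = some v := by
    obtain ⟨l, ls, hls⟩ := List.exists_cons_of_ne_nil hne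
    exact ⟨ls.foldl max l, by rw [hls]; exact PySem.List.max?_id_cons l ls⟩
  have hvm : v ∈ loads := PySem.List.max?_mem hv
  by_cases hpos : ∀ l ∈ loads, 0 ≤ l
  · -- nonnegative loads: both sides compute the least greedily-feasible cap
    have halt := alt_eq_bestR loads servers
    have hE : ∀ m, can_distribute loads servers m = true ↔ find_minimum_max_load_alt loads servers ≤ m := by
      intro m; rw [halt]; exact canDist_iff_bestR loads servers hne hpos m
    have hBS : find_minimum_max_load_alt loads servers ≤ loads.sum := by
      rw [halt]; exact bestR_le_sum _ _ hpos
    have hcB : can_distribute loads servers (find_minimum_max_load_alt loads servers) = true :=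
      (hE _).mpr le_rfl
    have hallB := ((canDistLoop_iff servers (find_minimum_max_load_alt loads servers) loads 0 1
      (by omega) (by omega)).mp hcB).1
    have hlow : v ≤ find_minimum_max_load_alt loads servers := hallB v hvm
    unfold find_minimum_max_load
    simp only [hv, Option.getD_some]
    exact searchLoop_eq loads servers _ hE v loads.sum loads.sum hlow hBS (by omega)
  · -- at most one server or a single load: both sides return sum(loads)
    have hs : servers ≤ 1 ∨ loads.length = 1 := by tauto
    have hlen : 0 < loads.length := List.length_pos_iff.mpr hne
    have hk : min servers ((loads.length : Int)) ≤ 1 := by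
      rcases hs with h | h
      · omega
      · rw [h]; simp
    rw [alt_eq_sum loads servers hk]
    unfold find_minimum_max_load
    simp only [hv, Option.getD_some]
    exact searchLoop_sum loads servers (canDist_sum_le loads servers hne hs) v loads.sum loads.sum
      rfl le_rfl
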